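-- pv_equiv track=rewrite | github.com/Memory1219/cv-assignments | Final-lab/final_code/utils.py | select_connects
-- ===== SOURCE A (Python) =====
-- def select_connects(mode):
--     connects = []
--     if mode == 8:
--         for x in [1, 0, -1]:
--             for y in [1, 0, -1]:
--                 if x == 0 and y == 0:
--                     continue
--                 connects.append((x, y))
--     if mode == 4:
--         for x in [1, 0, -1]:
--             for y in [1, 0, -1]:
--                 if abs(x + y) == 1:
--                     connects.append((x, y))
--     return connects
-- ===== SOURCE B (Python) =====
-- def select_connects(mode):
--     if mode == 8:
--         return [(1, 1), (1, 0), (1, -1), (0, 1), (0, -1), (-1, 1), (-1, 0), (-1, -1)]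
--     if mode == 4:
--         return [(1, 0), (0, 1), (0, -1), (-1, 0)]
--     return []
-- ===== Notes on version B (the rewrite author's own statement) =====
-- stated objective: simpler
-- what changed: Replaced the nested loops with filter conditions by explicit literal neighbor-offset lists returned per mode (closed form / lookup).
import Mathlib
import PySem

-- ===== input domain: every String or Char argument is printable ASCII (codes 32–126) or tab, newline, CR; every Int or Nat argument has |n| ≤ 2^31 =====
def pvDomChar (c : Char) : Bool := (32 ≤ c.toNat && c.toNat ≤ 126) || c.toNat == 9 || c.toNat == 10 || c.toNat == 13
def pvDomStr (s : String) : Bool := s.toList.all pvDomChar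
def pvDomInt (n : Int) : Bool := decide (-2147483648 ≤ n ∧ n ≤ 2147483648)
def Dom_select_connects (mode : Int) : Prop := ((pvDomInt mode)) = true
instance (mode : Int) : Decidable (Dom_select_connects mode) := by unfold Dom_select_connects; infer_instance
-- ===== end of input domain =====

-- B replaces A's nested loops/filters by explicit literal offset lists per mode (simpler).

-- ===== PORT A =====
def select_connects (mode : Int) : List (Int × Int) :=
  let connects : List (Int × Int) := []
  let connects :=
    if mode == 8 then
      [(1 : Int), 0, -1].foldl (fun acc x =>
        [(1 : Int), 0, -1].foldl (fun acc y =>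
          if x == 0 && y == 0 then acc else acc ++ [(x, y)]) acc) connects
    else connects
  let connects :=
    if mode == 4 then
      [(1 : Int), 0, -1].foldl (fun acc x =>
        [(1 : Int), 0, -1].foldl (fun acc y =>
          if (x + y).natAbs == 1 then acc ++ [(x, y)] else acc) acc) connects
    else connects
  connects

-- ===== PORT B =====
def select_connects_alt (mode : Int) : List (Int × Int) :=
  if mode == 8 then
    [(1, 1), (1, 0), (1, -1), (0, 1), (0, -1), (-1, 1), (-1, 0), (-1, -1)]
  else if mode == 4 then
    [(1, 0), (0, 1), (0, -1), (-1, 0)]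
  else []

-- ===== PRECONDITION & SPEC =====
def Spec_select_connects (mode : Int) (out : List (Int × Int)) : Prop := out = select_connects_alt mode
instance (mode : Int) (out : List (Int × Int)) : Decidable (Spec_select_connects mode out) := by unfold Spec_select_connects; infer_instance

-- ===== CLAIM (what is proved, stated in full; the proofs are below) =====
def Claim_equal_select_connects : Prop := ∀ (mode : Int), Dom_select_connects mode → Spec_select_connects mode (select_connects mode)

-- ===== LEMMAS AND PROOFS =====

-- ===== VERDICT (by name: the statement is the Claim_ definition above) =====
theorem select_connects_spec : Claim_equal_select_connects := by
  intro mode _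
  unfold Spec_select_connects select_connects select_connects_alt
  by_cases h8 : mode = 8
  · subst h8; decide
  · by_cases h4 : mode = 4
    · subst h4; decide
    · simp [h4, h8]
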